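-- pv_equiv track=rewrite | github.com/schancel/conceptual-refinement | implementation/conceptual_calculus.py | _generate_contexts
-- ===== SOURCE A (Python) =====
-- from typing import List, Tuple, Dict, Optional
--
-- def _generate_contexts(concept: str, n: int) -> List[str]:
--     """
--     Generate diverse contexts for a concept.
--
--     Args:
--         concept: The concept to contextualize
--         n: Number of contexts to generate
--
--     Returns:
--         List of context strings
--     """
--     # Template-based context generation
--     templates = [
--         f"The concept of {concept}",
--         f"Understanding {concept}",
--         f"When we think about {concept}",
--         f"The meaning of {concept}",
--         f"What is {concept}",
--         f"Consider the idea of {concept}",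
--         f"Regarding {concept}",
--         f"In relation to {concept}",
--         f"The notion of {concept}",
--         f"Thinking about {concept}",
--         f"{concept} is important because",
--         f"{concept} can be understood as",
--         f"The essence of {concept}",
--         f"Looking at {concept}",
--         f"{concept} involves",
--         f"We can describe {concept} as",
--         f"The idea behind {concept}",
--         f"{concept} relates to",
--         f"Exploring {concept}",
--         f"The nature of {concept}",
--     ]
--
--     # Cycle through templates to reach n contexts
--     contexts = []
--     for i in range(n):
--         contexts.append(templates[i % len(templates)])
--
--     return contexts[:n]
-- ===== SOURCE B (Python) =====
-- from typing import List
--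
--
-- def _generate_contexts(concept: str, n: int) -> List[str]:
--     """Generate diverse contexts by appending whole template blocks, then one partial block."""
--     templates = [
--         f"The concept of {concept}",
--         f"Understanding {concept}",
--         f"When we think about {concept}",
--         f"The meaning of {concept}",
--         f"What is {concept}",
--         f"Consider the idea of {concept}",
--         f"Regarding {concept}",
--         f"In relation to {concept}",
--         f"The notion of {concept}",
--         f"Thinking about {concept}",
--         f"{concept} is important because",
--         f"{concept} can be understood as",
--         f"The essence of {concept}",
--         f"Looking at {concept}",
--         f"{concept} involves",
--         f"We can describe {concept} as",
--         f"The idea behind {concept}",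
--         f"{concept} relates to",
--         f"Exploring {concept}",
--         f"The nature of {concept}",
--     ]
--     contexts: List[str] = []
--     remaining = n
--     while remaining >= len(templates):
--         contexts.extend(templates)
--         remaining -= len(templates)
--     if remaining > 0:
--         contexts.extend(templates[:remaining])
--     return contexts
-- ===== Notes on version B (the rewrite author's own statement) =====
-- stated objective: simpler
-- what changed: Replaces the per-element range(n) loop with a modulo index by block construction: append whole copies of the template list while at least 20 items remain, then one prefix slice for the remainder, so no element is ever indexed individually.
import Mathlib
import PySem

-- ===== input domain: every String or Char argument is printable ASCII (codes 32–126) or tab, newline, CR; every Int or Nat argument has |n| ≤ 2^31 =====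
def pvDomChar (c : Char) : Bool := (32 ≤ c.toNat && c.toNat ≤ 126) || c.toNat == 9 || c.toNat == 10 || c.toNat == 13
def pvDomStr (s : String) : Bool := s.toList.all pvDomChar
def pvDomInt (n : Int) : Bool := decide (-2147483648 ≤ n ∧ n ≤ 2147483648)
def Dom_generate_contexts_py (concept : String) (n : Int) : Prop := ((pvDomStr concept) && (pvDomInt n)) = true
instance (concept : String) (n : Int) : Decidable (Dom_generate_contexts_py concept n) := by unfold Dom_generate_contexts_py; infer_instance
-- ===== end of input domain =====

-- B replaces A's per-element range(n) loop with a modulo index by block construction: whole template copies while ≥20 remain, then one prefix slice (simpler decomposition; same cost).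


-- ===== PORT A =====
-- the `templates` list literal, identical in A and B (both Pythons build it the same way)
def pvTemplates (concept : String) : List String :=
  [ "The concept of " ++ concept
  , "Understanding " ++ concept
  , "When we think about " ++ concept
  , "The meaning of " ++ concept
  , "What is " ++ concept
  , "Consider the idea of " ++ concept
  , "Regarding " ++ concept
  , "In relation to " ++ concept
  , "The notion of " ++ concept
  , "Thinking about " ++ concept
  , concept ++ " is important because"
  , concept ++ " can be understood as"
  , "The essence of " ++ concept
  , "Looking at " ++ concept
  , concept ++ " involves"
  , "We can describe " ++ concept ++ " as"
  , "The idea behind " ++ concept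
  , concept ++ " relates to"
  , "Exploring " ++ concept
  , "The nature of " ++ concept ]

-- for i in range(n): contexts.append(templates[i % len(templates)]); then contexts[:n].
-- i % len(templates) is always in range for i ≥ 0, so the indexing never raises; pyGetD's default is never used
def generate_contexts_py (concept : String) (n : Int) : List String :=
  PySem.List.slice
    ((PySem.List.pyRange 0 n 1).foldl
      (fun acc i => acc ++
        [PySem.List.pyGetD (pvTemplates concept) (PySem.Int.mod i ((pvTemplates concept).length : Int)) ""]) [])
    none (some n)

-- ===== PORT B =====
-- the while loop: extend contexts by the whole template list while remaining ≥ 20 (= len(templates)),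
-- then the trailing `if remaining > 0: contexts.extend(templates[:remaining])`.
-- remaining starts at n; a negative n never enters the loop or the if, so .toNat (= 0 there) is exact.
def pvLoopB (ts : List String) (acc : List String) (m : Nat) : List String :=
  if 20 ≤ m then pvLoopB ts (acc ++ ts) (m - 20)
  else if 0 < m then acc ++ ts.take m else acc
termination_by m
decreasing_by omega

def generate_contexts_py_alt (concept : String) (n : Int) : List String :=
  pvLoopB (pvTemplates concept) [] n.toNat

-- ===== PRECONDITION & SPEC =====
def Spec_generate_contexts_py (concept : String) (n : Int) (out : List String) : Prop := out = generate_contexts_py_alt concept n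
instance (concept : String) (n : Int) (out : List String) : Decidable (Spec_generate_contexts_py concept n out) := by unfold Spec_generate_contexts_py; infer_instance

-- ===== CLAIM (what is proved, stated in full; the proofs are below) =====
def Claim_equal_generate_contexts_py : Prop := ∀ (concept : String) (n : Int), Dom_generate_contexts_py concept n → Spec_generate_contexts_py concept n (generate_contexts_py concept n)

-- ===== LEMMAS AND PROOFS =====

-- the modulo table read as a prefix, for m ≤ length
lemma range_map_getD_take {α : Type} (ts : List α) (d : α) (m : Nat) (hm : m ≤ ts.length) :
    (List.range m).map (fun j => ts.getD j d) = ts.take m := by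
  apply List.ext_getElem?
  intro i
  by_cases hi : i < m
  · rw [List.getElem?_map, List.getElem?_range hi, List.getElem?_take_of_lt hi]
    have : i < ts.length := by omega
    simp [List.getElem?_eq_getElem this, List.getD_eq_getElem?_getD]
  · rw [List.getElem?_eq_none (by simp; omega), List.getElem?_eq_none (by simp; omega)]

-- B's while loop computes acc ++ the modulo-indexed table of length m
lemma pvLoopB_eq (ts : List String) (hlen : ts.length = 20) :
    ∀ (m : Nat) (acc : List String),
      pvLoopB ts acc m = acc ++ (List.range m).map (fun j => ts.getD (j % 20) "") := by
  intro m
  induction m using Nat.strong_induction_on with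
  | _ m ih =>
    intro acc
    rw [pvLoopB]
    by_cases h : 20 ≤ m
    · rw [if_pos h, ih (m - 20) (by omega)]
      have hm : m = 20 + (m - 20) := by omega
      rw [hm, List.range_add, List.map_append, List.map_map]
      have h1 : (List.range 20).map (fun j => ts.getD (j % 20) "") = ts := by
        have : (List.range 20).map (fun j => ts.getD (j % 20) "")
            = (List.range 20).map (fun j => ts.getD j "") := by
          apply List.map_congr_left
          intro j hj
          rw [List.mem_range] at hj
          rw [Nat.mod_eq_of_lt hj]
        rw [this, ← hlen, range_map_getD_take ts "" ts.length le_rfl, List.take_length]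
      have h2 : (List.range (m - 20)).map ((fun j => ts.getD (j % 20) "") ∘ (fun j => 20 + j))
          = (List.range (m - 20)).map (fun j => ts.getD (j % 20) "") := by
        apply List.map_congr_left
        intro j _
        simp [Function.comp, Nat.add_mod_left]
      rw [h1, h2, List.append_assoc]
      have h3 : 20 + (m - 20) - 20 = m - 20 := by omega
      rw [h3]
    · rw [if_neg h]
      by_cases h0 : 0 < m
      · rw [if_pos h0]
        have : (List.range m).map (fun j => ts.getD (j % 20) "")
            = (List.range m).map (fun j => ts.getD j "") := by
          apply List.map_congr_left
          intro j hj
          rw [List.mem_range] at hj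
          rw [Nat.mod_eq_of_lt (by omega)]
        rw [this, range_map_getD_take ts "" m (by omega)]
      · rw [if_neg h0]
        have : m = 0 := by omega
        simp [this]

-- ===== VERDICT (by name: the statement is the Claim_ definition above) =====
theorem generate_contexts_py_spec : Claim_equal_generate_contexts_py := by
  intro concept n _
  unfold Spec_generate_contexts_py generate_contexts_py generate_contexts_py_alt
  have h20 : ((pvTemplates concept).length : Int) = 20 := by simp [pvTemplates]
  rw [h20]
  set ts := pvTemplates concept with hts
  have hlen : ts.length = 20 := by simp [hts, pvTemplates]
  rw [pvLoopB_eq ts hlen n.toNat []]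
  by_cases hn : n ≤ 0
  · rw [PySem.List.pyRange_one_eq_nil hn]
    have : n.toNat = 0 := by omega
    rcases lt_or_eq_of_le hn with h | h
    · simp [this, PySem.List.slice]
    · subst h
      rw [PySem.List.slice_to _ le_rfl]
      simp [this]
  · push Not at hn
    set m := n.toNat with hmn
    rw [PySem.List.slice_to _ (le_of_lt hn)]
    rw [PySem.List.foldl_append_singleton_eq_map]
    have hcontexts :
        (PySem.List.pyRange 0 n).map (fun i => PySem.List.pyGetD ts (PySem.Int.mod i 20) "")
          = (List.range m).map (fun j => ts.getD (j % 20) "") := by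
      rw [PySem.List.pyRange_one]
      simp only [Int.sub_zero]
      have hnm : n = (m : Int) := by omega
      rw [hnm, List.map_map]
      simp only [Int.toNat_natCast]
      apply List.map_congr_left
      intro j hj
      simp only [Function.comp]
      have hmodc : PySem.Int.mod ((0 : Int) + (j : Int)) 20 = ((j % 20 : Nat) : Int) := by
        rw [Int.zero_add]
        exact_mod_cast PySem.Int.mod_natCast j 20
      rw [hmodc, PySem.List.pyGetD_natCast]
    rw [hcontexts, List.take_of_length_le (by simp [hmn])]
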